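-- pv_equiv track=rewrite | github.com/brucedo/looms | scan_host_pkgs/scan_host_pkgs.py | parse_dpkg_run
-- ===== SOURCE A (Python) =====
-- logger = None
--
-- def parse_dpkg_run(dpkg_output):
--     """
--     Reads through the output of the dpkg run, creating a list of packages for each machine that actively responded,
--     and providing error reports for each machine that did NOT respond.
--     :param dpkg_output:  The output of the ansible dpkg run to be parsed for package data.
--     :return: A dictionary containing system names as keys, and lists of lists as values (where each sublist is
--     version and architecture data for a single package.)
--     """
--
--     # Dictionary with machine names (fully qualified) as keys and a list of lists as values, where each sublist
--     # represents one package, containing package name, version, and architecture.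
--     dpkg_dict = {}
--
--     # Use a state machine approach to reading in the contents of a return; assume we're starting a new record
--     # where each record is the response from ansible for a single machine.
--     state = 'new'
--     json_str = ''
--     brace_count = 0
--     system_name = ''
--     query_status = ''
--     # Iterate over the lines.
--     for line in dpkg_output.split('\n'):
--         # Because python removes the double newlines that denote end of stdout from ansible's command module,
--         # we must explicitly check for the keywords that indicate a new record here.
--         if (line.lower().find('agr.gc.ca') >= 0 or line.lower().find('cfia-acia.inspection.gc.ca') >= 0) and\
--            (line.find('>>') >= 0 or line.find('=>') >= 0):
--             # The JSON and stdout handlers below are intended to be fully independent - there should be zero cleanup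
--             # to be done here or in the new record handler, so we just set the state to new and move on.
--             state = 'new'
--
--         # Check our state and handle the line appropriately.
--         if state == 'new':
--             # Line appears to match agr or cfia system status report line.  Extract system name, process rest.
--             parts = line.split('|')
--             # Remove any whitespace from the individual elements of the parts list.
--             parts = [x.strip() for x in parts]
--             # First element = machine name.  Every part of this system is standardized on upper case machine names.
--             system_name = parts[0].upper()
--             # Second element = query status plus possibly some other junk.  We only care about "SUCCESS" which
--             # should come back clear.
--             query_status = parts[1].upper()
--             dpkg_dict[system_name] = []
--             # Keep the machine name on hand for re-use later.
--             # Now process the rest of the line to determine if we're expecting JSON or stdout.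
--             if line.endswith('=> {'):
--                 # JSON output!
--                 state = 'json'
--                 json_str = '{'
--                 brace_count = 1
--             else:
--                 # If not JSON, then it ran dpkg and we have stdout to parse.
--                 state = 'stdout'
--         elif state == 'json':
--             # Add the line to the json_str regardless of whether it's the final line or not.
--             json_str += '\n' + line
--             # Count the curly braces in the line.
--             brace_count += line.count('{')
--             brace_count -= line.count('}')
--             if brace_count < 0:
--                 # Should never be less than.
--                 logger.error('JSON string from ansible has more closing } than opening {.  There may be a problem.')
--                 logger.error('{0}'.format(json_str))
--             elif brace_count == 0:
--                 # End of JSON string.  In a more general service we could push the string into a JSON dict and pull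
--                 # structured data out of it, but here we just don't care.  Spit the string to log as an error.
--                 logger.error('JSON string returned instead of stdout string - an error occurred during read.')
--                 logger.error('{0}'.format(json_str))
--         elif state == 'stdout':
--                 # Perform the stdout parsing only in the event that the return value is SUCCESS.
--                 if query_status == 'SUCCESS':
--                     # We're only interested in lines starting with ii, for fully installed packages.
--                     if line.startswith('ii'):
--                         # Split the line up on whitespace.
--                         parts = line.split()
--                         # Some packages have the package architecture installed in the package name.  Remove it.
--                         if parts[1].count(':') > 0:
--                             parts[1] = parts[1][0:parts[1].find(':')]
--                         # Every package has a name, version and architecture and none of those three may contain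
--                         # whitespace.  It's safe, therefore, to blindly take parts[1:4].
--                         dpkg_dict[system_name].append(parts[1:4])
--
--     return dpkg_dict
-- ===== SOURCE B (Python) =====
-- def _is_header(line):
--     low = line.lower()
--     return (('agr.gc.ca' in low or 'cfia-acia.inspection.gc.ca' in low)
--             and ('>>' in line or '=>' in line))
--
--
-- def parse_dpkg_run(dpkg_output):
--     """Two-phase re-implementation: first cut the output into per-host record
--     segments (a new segment starts at every header line; the very first line
--     always starts one), then turn each segment into a dictionary entry."""
--     lines = dpkg_output.split('\n')
--
--     # Phase 1: segmentation.
--     segments = []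
--     current = [lines[0]]
--     for line in lines[1:]:
--         if _is_header(line):
--             segments.append(current)
--             current = [line]
--         else:
--             current.append(line)
--     segments.append(current)
--
--     # Phase 2: one dictionary entry per segment.
--     dpkg_dict = {}
--     for segment in segments:
--         header = segment[0]
--         parts = [x.strip() for x in header.split('|')]
--         system_name = parts[0].upper()
--         query_status = parts[1].upper()
--         dpkg_dict[system_name] = []
--         if header.endswith('=> {'):
--             # JSON error report: contributes no packages.
--             continue
--         if query_status == 'SUCCESS':
--             packages = []
--             for line in segment[1:]:
--                 if line.startswith('ii'):
--                     parts = line.split()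
--                     name = parts[1]
--                     if name.count(':') > 0:
--                         name = name[0:name.find(':')]
--                     packages.append([name] + parts[2:4])
--             dpkg_dict[system_name] = packages
--     return dpkg_dict
-- ===== Notes on version B (the rewrite author's own statement) =====
-- stated objective: alternative
-- what changed: A's single-pass three-state machine (new/json/stdout with carried brace/name/status variables) is replaced by a two-phase decomposition: first cut the split lines into per-host record segments at header lines, then turn each segment independently into its dictionary entry.
import Mathlib
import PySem

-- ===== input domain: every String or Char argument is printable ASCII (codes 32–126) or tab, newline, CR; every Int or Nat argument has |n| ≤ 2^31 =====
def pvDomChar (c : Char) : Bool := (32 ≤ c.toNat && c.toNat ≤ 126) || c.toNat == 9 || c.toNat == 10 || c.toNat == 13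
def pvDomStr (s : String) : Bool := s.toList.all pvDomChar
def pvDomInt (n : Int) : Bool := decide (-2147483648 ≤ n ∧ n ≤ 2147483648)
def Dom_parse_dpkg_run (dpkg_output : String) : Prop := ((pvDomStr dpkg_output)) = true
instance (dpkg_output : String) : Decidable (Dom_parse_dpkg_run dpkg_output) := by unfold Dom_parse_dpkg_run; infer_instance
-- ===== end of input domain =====

-- B re-implements the parser as two phases (cut the output into per-host record segments, then
-- build one dictionary entry per segment) instead of A's one-pass three-state machine; the
-- equivalence below is about the return value on inputs where the Python A returns (Pre_).

-- ===== PORT A =====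
-- A's state-machine states 'new' / 'json' / 'stdout'.
inductive PvMode
  | new | json | stdout
deriving DecidableEq, Repr

-- A's loop state: the dict plus the state-machine variables.
structure PvStA where
  dict : PySem.Dict String (List (List String))
  mode : PvMode
  json_str : List Char
  brace : Int
  name : String
  status : List Char
deriving Repr

-- A's header test: "(line.lower().find('agr.gc.ca') >= 0 or …) and (line.find('>>') >= 0 or line.find('=>') >= 0)"
def pvHdrA (line : List Char) : Bool :=
  (decide (0 ≤ PySem.Chars.find (PySem.Chars.lower line) ("agr.gc.ca".toList)) ||
   decide (0 ≤ PySem.Chars.find (PySem.Chars.lower line) ("cfia-acia.inspection.gc.ca".toList))) &&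
  (decide (0 ≤ PySem.Chars.find line (">>".toList)) || decide (0 ≤ PySem.Chars.find line ("=>".toList)))

-- one iteration of A's for-loop; `none` = the Python raises (IndexError on parts[1],
-- AttributeError from `logger.error` since logger is None).
def pvStepA (st : PvStA) (line : List Char) : Option PvStA :=
  let st := if pvHdrA line then { st with mode := PvMode.new } else st
  match st.mode with
  | PvMode.new =>
    let parts := (PySem.Chars.splitOn line ['|']).map PySem.Chars.strip
    match PySem.List.pyGet? parts 0, PySem.List.pyGet? parts 1 with
    | some p0, some p1 =>
      let system_name := String.ofList (PySem.Chars.upper p0)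
      let query_status := PySem.Chars.upper p1
      let d := st.dict.insert system_name []
      if PySem.Chars.endswith line ("=> {".toList) then
        some { dict := d, mode := PvMode.json, json_str := ['{'], brace := 1,
               name := system_name, status := query_status }
      else
        some { dict := d, mode := PvMode.stdout, json_str := st.json_str, brace := st.brace,
               name := system_name, status := query_status }
    | _, _ => none
  | PvMode.json =>
    let js := st.json_str ++ '\n' :: line
    let bc := st.brace + (PySem.Chars.count line ['{'] : Int) - (PySem.Chars.count line ['}'] : Int)
    if bc < 0 then none          -- logger.error with logger = None: AttributeError
    else if bc = 0 then none     -- same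
    else some { st with json_str := js, brace := bc }
  | PvMode.stdout =>
    if st.status = ("SUCCESS".toList) then
      if PySem.Chars.startswith line ("ii".toList) then
        let parts := PySem.Chars.split₀ line
        match PySem.List.pyGet? parts 1 with
        | some p1 =>
          let p1' := if 0 < PySem.Chars.count p1 [':'] then
              PySem.List.slice p1 (some 0) (some (PySem.Chars.find p1 [':'])) else p1
          let parts := PySem.List.pySetD parts 1 p1'
          some { st with dict := (st.dict.modify st.name []
                   (fun l => l ++ [(PySem.List.slice parts (some 1) (some 4)).map String.ofList])) }
        | none => none
      else some st
    else some st

def pvRunA (o : Option PvStA) (ls : List (List Char)) : Option PvStA :=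
  ls.foldl (fun o line => o.bind (fun st => pvStepA st line)) o

def parse_dpkg_run (dpkg_output : String) : List (String × List (List String)) :=
  let lines := PySem.Chars.splitOn dpkg_output.toList ['\n']
  let init : PvStA := { dict := PySem.Dict.empty, mode := PvMode.new, json_str := [],
                        brace := 0, name := "", status := [] }
  match pvRunA (some init) lines with
  | some st => st.dict.items
  | none => []          -- the Python raises there; excluded by Pre_

-- ===== PORT B =====
-- B's header test uses `in` ("'agr.gc.ca' in low or …").
def pvHdrB (line : List Char) : Bool :=
  (PySem.Chars.isIn ("agr.gc.ca".toList) (PySem.Chars.lower line) ||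
   PySem.Chars.isIn ("cfia-acia.inspection.gc.ca".toList) (PySem.Chars.lower line)) &&
  (PySem.Chars.isIn (">>".toList) line || PySem.Chars.isIn ("=>".toList) line)

-- B's inner package loop over the body of one SUCCESS/stdout segment.
def pvSegPkgs (body : List (List Char)) : Option (List (List String)) :=
  body.foldl (fun o line => o.bind (fun pkgs =>
    if PySem.Chars.startswith line ("ii".toList) then
      match PySem.List.pyGet? (PySem.Chars.split₀ line) 1 with
      | some nm =>
        let nm := if 0 < PySem.Chars.count nm [':'] then
            PySem.List.slice nm (some 0) (some (PySem.Chars.find nm [':'])) else nm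
        some (pkgs ++ [String.ofList nm ::
                (PySem.List.slice (PySem.Chars.split₀ line) (some 2) (some 4)).map String.ofList])
      | none => none            -- IndexError on parts[1]
    else some pkgs)) (some [])

-- B's phase 2: one dictionary entry per segment.
def pvSegStep (o : Option (PySem.Dict String (List (List String)))) (seg : List (List Char)) :
    Option (PySem.Dict String (List (List String))) :=
  o.bind (fun d =>
    match seg with
    | [] => none                -- segments are never empty (phase 1 only builds nonempty ones)
    | header :: body =>
      let parts := (PySem.Chars.splitOn header ['|']).map PySem.Chars.strip
      match PySem.List.pyGet? parts 0, PySem.List.pyGet? parts 1 with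
      | some p0, some p1 =>
        let name := String.ofList (PySem.Chars.upper p0)
        let status := PySem.Chars.upper p1
        let d := d.insert name []
        if PySem.Chars.endswith header ("=> {".toList) then some d
        else if status = ("SUCCESS".toList) then
          (pvSegPkgs body).map (fun pkgs => d.insert name pkgs)
        else some d
      | _, _ => none)

def parse_dpkg_run_alt (dpkg_output : String) : List (String × List (List String)) :=
  match PySem.Chars.splitOn dpkg_output.toList ['\n'] with
  | [] => []                    -- str.split('\n') never returns an empty list; dead branch
  | l0 :: rest =>
    -- Phase 1: segmentation (segments, current).
    let p := rest.foldl (fun (p : List (List (List Char)) × List (List Char)) line =>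
        if pvHdrB line then (p.1 ++ [p.2], [line]) else (p.1, p.2 ++ [line])) ([], [l0])
    let segments := p.1 ++ [p.2]
    -- Phase 2.
    match segments.foldl pvSegStep (some PySem.Dict.empty) with
    | some d => d.items
    | none => []                -- the Python raises there; excluded by Pre_

-- ===== PRECONDITION & SPEC =====
-- net brace count of one line
def pvDelta (line : List Char) : Int :=
  (PySem.Chars.count line ['{'] : Int) - (PySem.Chars.count line ['}'] : Int)

-- the record segments of the line list: a new segment starts at every header line,
-- and the very first line always starts one
def pvRecAux (h : List Char) (acc : List (List Char)) : List (List Char) → List (List (List Char))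
  | [] => [h :: acc]
  | x :: xs => if pvHdrB x then (h :: acc) :: pvRecAux x [] xs else pvRecAux h (acc ++ [x]) xs

def pvRecords : List (List Char) → List (List (List Char))
  | [] => []
  | l :: ls => pvRecAux l [] ls

-- one record raises no exception in A: its header splits on '|' into at least two fields;
-- a JSON record's running brace count never falls to zero; a SUCCESS stdout record's
-- 'ii' lines have at least two whitespace-separated tokens.
def pvSegOK (seg : List (List Char)) : Bool :=
  match seg with
  | [] => true
  | header :: body =>
    let parts := (PySem.Chars.splitOn header ['|']).map PySem.Chars.strip
    decide (2 ≤ parts.length) &&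
    (if PySem.Chars.endswith header ("=> {".toList) then
       (List.range (body.length + 1)).all (fun k => decide (0 ≤ ((body.take k).map pvDelta).sum))
     else if PySem.Chars.upper (parts.getD 1 []) = ("SUCCESS".toList) then
       body.all (fun line => !PySem.Chars.startswith line ("ii".toList) ||
                             decide (2 ≤ (PySem.Chars.split₀ line).length))
     else true)

-- Pre_ excludes exactly the inputs on which the Python A raises: a header (or first) line
-- without '|' (IndexError), a JSON record whose braces close or over-close (AttributeError
-- from the None logger), or a SUCCESS 'ii' line with fewer than two tokens (IndexError).
def Pre_parse_dpkg_run (dpkg_output : String) : Prop :=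
  ∀ seg ∈ pvRecords (PySem.Chars.splitOn dpkg_output.toList ['\n']), pvSegOK seg = true
instance (dpkg_output : String) : Decidable (Pre_parse_dpkg_run dpkg_output) := by
  unfold Pre_parse_dpkg_run; infer_instance

def pvWitness_parse_dpkg_run : String :=
  "x.agr.gc.ca | SUCCESS | rc=0 >>\nii pkg:amd64 1.0 amd64\nrc foo 1 b"

def Spec_parse_dpkg_run (dpkg_output : String) (out : List (String × List (List String))) : Prop :=
  out = parse_dpkg_run_alt dpkg_output
instance (dpkg_output : String) (out : List (String × List (List String))) :
    Decidable (Spec_parse_dpkg_run dpkg_output out) := by unfold Spec_parse_dpkg_run; infer_instance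

-- ===== CLAIM (what is proved, stated in full; the proofs are below) =====
def Claim_equal_parse_dpkg_run : Prop := ∀ (dpkg_output : String), Dom_parse_dpkg_run dpkg_output → Pre_parse_dpkg_run dpkg_output → Spec_parse_dpkg_run dpkg_output (parse_dpkg_run dpkg_output)

-- ===== LEMMAS AND PROOFS =====

theorem pv_isIn_decide (sub s : List Char) :
    PySem.Chars.isIn sub s = decide (0 ≤ PySem.Chars.find s sub) := by
  by_cases h : sub <:+: s
  · rw [(PySem.Chars.isIn_iff_infix _ _).mpr h, decide_eq_true ((PySem.Chars.find_nonneg_iff _ _).mpr h)]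
  · rw [(PySem.Chars.isIn_eq_false_iff _ _).mpr h,
        decide_eq_false (by rw [PySem.Chars.find_nonneg_iff _ _]; exact h)]

theorem pv_hdr_eq (line : List Char) : pvHdrB line = pvHdrA line := by
  simp only [pvHdrA, pvHdrB, pv_isIn_decide]

theorem pv_recAux_eq (ls : List (List Char)) : ∀ (h : List Char) (acc : List (List Char)),
    pvRecAux h acc ls = (h :: (acc ++ ls.takeWhile (fun x => !pvHdrB x))) ::
      pvRecords (ls.dropWhile (fun x => !pvHdrB x)) := by
  induction ls with
  | nil => intro h acc; simp [pvRecAux, pvRecords]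
  | cons x xs ih =>
    intro h acc
    by_cases hx : pvHdrB x
    · simp [pvRecAux, hx, pvRecords]
    · simp [pvRecAux, hx, ih]

theorem pv_records_cons (l : List Char) (ls : List (List Char)) :
    pvRecords (l :: ls) = (l :: ls.takeWhile (fun x => !pvHdrB x)) ::
      pvRecords (ls.dropWhile (fun x => !pvHdrB x)) := by
  show pvRecAux l [] ls = _
  simp [pv_recAux_eq]

theorem pv_recAux_flatten (ls : List (List Char)) : ∀ (h : List Char) (acc : List (List Char)),
    (pvRecAux h acc ls).flatten = (h :: acc) ++ ls := by
  induction ls with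
  | nil => intro h acc; simp [pvRecAux]
  | cons x xs ih =>
    intro h acc
    by_cases hx : pvHdrB x
    · simp [pvRecAux, hx, ih]
    · simp [pvRecAux, hx, ih]

theorem pv_records_flatten (ls : List (List Char)) : (pvRecords ls).flatten = ls := by
  cases ls with
  | nil => rfl
  | cons l ls => simpa using pv_recAux_flatten ls l []

theorem pv_recAux_shape (ls : List (List Char)) : ∀ (h : List Char) (acc : List (List Char)),
    (∀ x ∈ acc, pvHdrB x = false) →
    ∀ seg ∈ pvRecAux h acc ls, ∃ hd b, seg = hd :: b ∧ ∀ x ∈ b, pvHdrB x = false := by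
  induction ls with
  | nil =>
    intro h acc hacc seg hseg
    simp only [pvRecAux, List.mem_singleton] at hseg
    exact ⟨h, acc, hseg, hacc⟩
  | cons x xs ih =>
    intro h acc hacc seg hseg
    by_cases hx : pvHdrB x
    · simp only [pvRecAux, hx, if_pos, List.mem_cons] at hseg
      rcases hseg with rfl | hseg
      · exact ⟨h, acc, rfl, hacc⟩
      · exact ih x [] (by simp) seg hseg
    · simp only [pvRecAux, hx, if_neg, Bool.false_eq_true, not_false_iff] at hseg
      refine ih h (acc ++ [x]) ?_ seg hseg
      intro y hy
      rcases List.mem_append.mp hy with hy | hy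
      · exact hacc y hy
      · simp only [List.mem_singleton] at hy; subst hy; exact eq_false_of_ne_true hx

theorem pv_records_shape (ls : List (List Char)) :
    ∀ seg ∈ pvRecords ls, ∃ h b, seg = h :: b ∧ ∀ x ∈ b, pvHdrB x = false := by
  cases ls with
  | nil => intro seg hseg; simp [pvRecords] at hseg
  | cons l ls => exact pv_recAux_shape ls l [] (by simp)

theorem pv_recAux_tail_hdr (ls : List (List Char)) : ∀ (h : List Char) (acc : List (List Char)),
    ∀ seg ∈ (pvRecAux h acc ls).tail, ∃ hd b, seg = hd :: b ∧ pvHdrB hd = true := by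
  induction ls with
  | nil => intro h acc seg hseg; simp [pvRecAux] at hseg
  | cons x xs ih =>
    intro h acc seg hseg
    by_cases hx : pvHdrB x
    · simp only [pvRecAux, hx, if_pos, List.tail_cons] at hseg
      rw [pv_recAux_eq] at hseg
      rcases List.mem_cons.mp hseg with rfl | hseg
      · exact ⟨x, _, rfl, hx⟩
      · have := ih x [] seg
        rw [pv_recAux_eq, List.tail_cons] at this
        exact this hseg
    · simp only [pvRecAux, hx, Bool.false_eq_true, if_neg, not_false_iff] at hseg
      exact ih h (acc ++ [x]) seg hseg

theorem pv_records_tail_hdr (ls : List (List Char)) :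
    ∀ seg ∈ (pvRecords ls).tail, ∃ h b, seg = h :: b ∧ pvHdrB h = true := by
  cases ls with
  | nil => intro seg hseg; simp [pvRecords] at hseg
  | cons l ls => exact pv_recAux_tail_hdr ls l []

theorem pv_segB (ls : List (List Char)) : ∀ (segs : List (List (List Char))) (cur : List (List Char)),
    (ls.foldl (fun (p : List (List (List Char)) × List (List Char)) line =>
        if pvHdrB line then (p.1 ++ [p.2], [line]) else (p.1, p.2 ++ [line])) (segs, cur)).1 ++
      [(ls.foldl (fun (p : List (List (List Char)) × List (List Char)) line =>
        if pvHdrB line then (p.1 ++ [p.2], [line]) else (p.1, p.2 ++ [line])) (segs, cur)).2] =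
    segs ++ ((cur ++ ls.takeWhile (fun x => !pvHdrB x)) ::
             pvRecords (ls.dropWhile (fun x => !pvHdrB x))) := by
  induction ls with
  | nil => intro segs cur; simp [pvRecords]
  | cons x xs ih =>
    intro segs cur
    by_cases hx : pvHdrB x
    · simp only [List.foldl_cons, hx, if_pos, List.takeWhile_cons, List.dropWhile_cons,
                 Bool.not_true, Bool.false_eq_true, if_neg, not_false_iff]
      rw [ih (segs ++ [cur]) [x], pv_records_cons]
      simp
    · simp only [List.foldl_cons, hx, Bool.false_eq_true, if_neg, not_false_iff,
                 List.takeWhile_cons, List.dropWhile_cons, Bool.not_false, if_pos]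
      rw [ih segs (cur ++ [x])]
      simp

theorem pv_jsonA (body : List (List Char)) : ∀ (st : PvStA),
    st.mode = PvMode.json →
    (∀ x ∈ body, pvHdrA x = false) →
    (∀ k ≤ body.length, 1 ≤ st.brace + ((body.take k).map pvDelta).sum) →
    ∃ st', pvRunA (some st) body = some st' ∧ st'.dict = st.dict := by
  induction body with
  | nil => intro st _ _ _; exact ⟨st, rfl, rfl⟩
  | cons l ls ih =>
    intro st hmode hhdr hsum
    have hl : pvHdrA l = false := hhdr l (List.mem_cons_self)
    have hbc1 : 1 ≤ st.brace + ((PySem.Chars.count l ['{'] : Int) - (PySem.Chars.count l ['}'] : Int)) := by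
      have := hsum 1 (by simp)
      simpa [pvDelta] using this
    have hstep : pvStepA st l = some { st with json_str := st.json_str ++ '\n' :: l, brace := st.brace + (PySem.Chars.count l ['{'] : Int) - (PySem.Chars.count l ['}'] : Int) } := by
      rw [pvStepA]
      simp only [hl, Bool.false_eq_true, if_neg, not_false_iff, hmode]
      rw [if_neg (by omega), if_neg (by omega)]
    obtain ⟨st', hrun, hdict⟩ := ih { st with json_str := st.json_str ++ '\n' :: l, brace := st.brace + (PySem.Chars.count l ['{'] : Int) - (PySem.Chars.count l ['}'] : Int) }
      hmode (fun x hx => hhdr x (List.mem_cons_of_mem _ hx))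
      (by
        intro k hk
        have h2 := hsum (k + 1) (by simpa using Nat.succ_le_succ hk)
        simp only [List.take_succ_cons, List.map_cons, List.sum_cons, pvDelta] at h2
        show (1:Int) ≤ st.brace + (PySem.Chars.count l ['{'] : Int) -
          (PySem.Chars.count l ['}'] : Int) + (List.map pvDelta (List.take k ls)).sum
        omega)
    refine ⟨st', ?_, hdict⟩
    simp only [pvRunA, List.foldl_cons] at hrun ⊢
    rw [Option.bind_some, hstep]
    exact hrun

theorem pv_stdoutSkipA (body : List (List Char)) : ∀ (st : PvStA),
    st.mode = PvMode.stdout → st.status ≠ ("SUCCESS".toList) →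
    (∀ x ∈ body, pvHdrA x = false) →
    pvRunA (some st) body = some st := by
  induction body with
  | nil => intro st _ _ _; rfl
  | cons l ls ih =>
    intro st hmode hst hhdr
    have hl : pvHdrA l = false := hhdr l (List.mem_cons_self)
    have hst' : st.status ≠ ['S','U','C','C','E','S','S'] := by simpa using hst
    have hstep : pvStepA st l = some st := by
      rw [pvStepA]
      simp [hl, hmode, hst']
    simp only [pvRunA, List.foldl_cons]
    rw [Option.bind_some, hstep]
    exact ih st hmode hst (fun x hx => hhdr x (List.mem_cons_of_mem _ hx))

theorem pv_pkgstep (l : List Char) (a b : List Char) (t : List (List Char))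
    (hsplit : PySem.Chars.split₀ l = a :: b :: t) :
    PySem.List.pyGet? (PySem.Chars.split₀ l) 1 = some b ∧
    ∀ v : List Char,
      (PySem.List.slice (PySem.List.pySetD (PySem.Chars.split₀ l) 1 v) (some 1) (some 4)).map String.ofList =
        String.ofList v :: (PySem.List.slice (PySem.Chars.split₀ l) (some 2) (some 4)).map String.ofList := by
  rw [hsplit]
  constructor
  · rw [show (1 : Int) = ((1 : Nat) : Int) from rfl, PySem.List.pyGet?_ofNat _ 1 (by simp)]
    rfl
  · intro v
    have h1 : PySem.List.pySetD (a :: b :: t) 1 v = a :: v :: t := by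
      simp [PySem.List.pySetD, PySem.List.pySet?, PySem.List.pyIdx?,
            show ((1 : Int) < (t.length : Int) + 1 + 1) from by omega]
    rw [h1, PySem.List.slice_toNat _ (by omega) (by omega),
        PySem.List.slice_toNat _ (by omega) (by omega)]
    simp only [show Int.toNat 4 = 4 from rfl, show Int.toNat 1 = 1 from rfl,
               show Int.toNat 2 = 2 from rfl]
    simp [List.take_succ_cons]

theorem pv_stdoutA (body : List (List Char)) :
    ∀ (st : PvStA) (d : PySem.Dict String (List (List String))) (pkgs : List (List String)),
    st.mode = PvMode.stdout → st.status = ("SUCCESS".toList) →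
    st.dict = d.insert st.name pkgs →
    (∀ x ∈ body, pvHdrA x = false) →
    (∀ line ∈ body, PySem.Chars.startswith line ("ii".toList) = true →
        2 ≤ (PySem.Chars.split₀ line).length) →
    ∃ st' pk, pvRunA (some st) body = some st' ∧
      body.foldl (fun o line => o.bind (fun pkgs =>
        if PySem.Chars.startswith line ("ii".toList) then
          match PySem.List.pyGet? (PySem.Chars.split₀ line) 1 with
          | some nm =>
            let nm := if 0 < PySem.Chars.count nm [':'] then
                PySem.List.slice nm (some 0) (some (PySem.Chars.find nm [':'])) else nm
            some (pkgs ++ [String.ofList nm ::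
                    (PySem.List.slice (PySem.Chars.split₀ line) (some 2) (some 4)).map String.ofList])
          | none => none
        else some pkgs)) (some pkgs) = some pk ∧
      st'.dict = d.insert st.name pk := by
  induction body with
  | nil => intro st d pkgs _ _ hdict _ _; exact ⟨st, pkgs, rfl, rfl, hdict⟩
  | cons l ls ih =>
    intro st d pkgs hmode hsucc hdict hhdr hii
    have hl : pvHdrA l = false := hhdr l (List.mem_cons_self)
    by_cases hstart : PySem.Chars.startswith l ("ii".toList) = true
    · have hlen : 2 ≤ (PySem.Chars.split₀ l).length := hii l (List.mem_cons_self) hstart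
      obtain ⟨a, b, t, hsplit⟩ : ∃ a b t, PySem.Chars.split₀ l = a :: b :: t := by
        match hx : PySem.Chars.split₀ l, hlen with
        | a :: b :: t, _ => exact ⟨a, b, t, rfl⟩
      obtain ⟨hget, hentry⟩ := pv_pkgstep l a b t hsplit
      set v := if 0 < PySem.Chars.count b [':'] then
          PySem.List.slice b (some 0) (some (PySem.Chars.find b [':'])) else b with hv
      set entry := String.ofList v ::
          (PySem.List.slice (PySem.Chars.split₀ l) (some 2) (some 4)).map String.ofList with hent
      have hstep : pvStepA st l = some { st with dict := st.dict.insert st.name (pkgs ++ [entry]) } := by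
        rw [pvStepA]
        simp only [hl, Bool.false_eq_true, if_neg, not_false_iff, hmode, hsucc, if_pos, hstart,
                   hget]
        have hmod : st.dict.modify st.name []
            (fun lst => lst ++ [(PySem.List.slice (PySem.List.pySetD (PySem.Chars.split₀ l) 1 v)
                (some 1) (some 4)).map String.ofList]) =
            st.dict.insert st.name (pkgs ++ [entry]) := by
          rw [hdict, PySem.Dict.modify, PySem.Dict.getD_insert_self, PySem.Dict.insert_insert_self,
              hentry v, PySem.Dict.insert_insert_self, hent]
        rw [← hmod]
      obtain ⟨st', pk, hrun, hfold, hd'⟩ := ih { st with dict := st.dict.insert st.name (pkgs ++ [entry]) }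
        d (pkgs ++ [entry]) hmode hsucc
        (by rw [hdict, PySem.Dict.insert_insert_self])
        (fun x hx => hhdr x (List.mem_cons_of_mem _ hx))
        (fun x hx h => hii x (List.mem_cons_of_mem _ hx) h)
      refine ⟨st', pk, ?_, ?_, hd'⟩
      · simp only [pvRunA, List.foldl_cons] at hrun ⊢
        rw [Option.bind_some, hstep]
        exact hrun
      · simp only [List.foldl_cons, Option.bind_some, hstart, if_true, hget]
        exact hfold
    · have hstart' : PySem.Chars.startswith l ['i','i'] ≠ true := by simpa using hstart
      have hstep : pvStepA st l = some st := by
        rw [pvStepA]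
        simp [hl, hmode, hsucc, hstart']
      obtain ⟨st', pk, hrun, hfold, hd'⟩ := ih st d pkgs hmode hsucc hdict
        (fun x hx => hhdr x (List.mem_cons_of_mem _ hx))
        (fun x hx h => hii x (List.mem_cons_of_mem _ hx) h)
      refine ⟨st', pk, ?_, ?_, hd'⟩
      · simp only [pvRunA, List.foldl_cons] at hrun ⊢
        rw [Option.bind_some, hstep]
        exact hrun
      · simp only [List.foldl_cons, Option.bind_some, if_neg hstart]
        exact hfold

theorem pv_recordA (st : PvStA) (header : List Char) (body : List (List Char))
    (hmode : st.mode = PvMode.new ∨ pvHdrA header = true)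
    (hbody : ∀ x ∈ body, pvHdrA x = false)
    (hok : pvSegOK (header :: body) = true) :
    ∃ st', pvRunA (some st) (header :: body) = some st' ∧
      pvSegStep (some st.dict) (header :: body) = some st'.dict := by
  simp only [pvSegOK, Bool.and_eq_true, decide_eq_true_eq] at hok
  obtain ⟨hlen, hcond⟩ := hok
  obtain ⟨p0, p1, t, hsplit⟩ :
      ∃ a b t, (PySem.Chars.splitOn header ['|']).map PySem.Chars.strip = a :: b :: t := by
    match hx : (PySem.Chars.splitOn header ['|']).map PySem.Chars.strip, hlen with
    | a :: b :: t, _ => exact ⟨a, b, t, rfl⟩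
  have hget0 : PySem.List.pyGet? (p0 :: p1 :: t) 0 = some p0 := by
    rw [show (0 : Int) = ((0 : Nat) : Int) from rfl, PySem.List.pyGet?_ofNat _ 0 (by simp)]
    rfl
  have hget1 : PySem.List.pyGet? (p0 :: p1 :: t) 1 = some p1 := by
    rw [show (1 : Int) = ((1 : Nat) : Int) from rfl, PySem.List.pyGet?_ofNat _ 1 (by simp)]
    rfl
  have hnew : (if pvHdrA header then { st with mode := PvMode.new } else st).mode = PvMode.new := by
    rcases hmode with h | h
    · by_cases hh : pvHdrA header <;> simp [hh, h]
    · simp [h]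
  have hdict0 : (if pvHdrA header then { st with mode := PvMode.new } else st).dict = st.dict := by
    by_cases hh : pvHdrA header <;> simp [hh]
  rw [hsplit] at hcond
  by_cases hjson : PySem.Chars.endswith header ("=> {".toList) = true
  · -- JSON record
    have hstep : pvStepA st header = some { dict := st.dict.insert (String.ofList (PySem.Chars.upper p0)) [], mode := PvMode.json, json_str := ['{'], brace := 1, name := String.ofList (PySem.Chars.upper p0), status := PySem.Chars.upper p1 } := by
      rw [pvStepA]
      simp only [hsplit, hget0, hget1, hnew, hdict0, hjson, if_true]
    rw [if_pos hjson] at hcond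
    simp only [List.all_eq_true, List.mem_range, decide_eq_true_eq] at hcond
    obtain ⟨st', hrun, hdict⟩ := pv_jsonA body { dict := st.dict.insert (String.ofList (PySem.Chars.upper p0)) [], mode := PvMode.json, json_str := ['{'], brace := 1, name := String.ofList (PySem.Chars.upper p0), status := PySem.Chars.upper p1 } rfl hbody
      (by
        intro k hk
        have := hcond k (by omega)
        show (1 : Int) ≤ 1 + ((body.take k).map pvDelta).sum
        omega)
    refine ⟨st', ?_, ?_⟩
    · simp only [pvRunA, List.foldl_cons, Option.bind_some] at hrun ⊢
      rw [hstep]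
      exact hrun
    · rw [pvSegStep]
      simp only [Option.bind_some, hsplit, hget0, hget1, hjson, if_true]
      rw [hdict]
  · -- stdout record
    have hstep : pvStepA st header = some { dict := st.dict.insert (String.ofList (PySem.Chars.upper p0)) [], mode := PvMode.stdout, json_str := st.json_str, brace := st.brace, name := String.ofList (PySem.Chars.upper p0), status := PySem.Chars.upper p1 } := by
      rw [pvStepA]
      have hjs0 : (if pvHdrA header then { st with mode := PvMode.new } else st).json_str = st.json_str := by
        by_cases hh : pvHdrA header <;> simp [hh]
      have hbr0 : (if pvHdrA header then { st with mode := PvMode.new } else st).brace = st.brace := by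
        by_cases hh : pvHdrA header <;> simp [hh]
      simp only [hsplit, hget0, hget1, hnew, hdict0, hjs0, hbr0, hjson, Bool.false_eq_true,
                 if_neg, not_false_iff]
    rw [if_neg hjson] at hcond
    simp only [List.getD_cons_succ, List.getD_cons_zero] at hcond
    by_cases hsucc : PySem.Chars.upper p1 = ("SUCCESS".toList)
    · rw [if_pos hsucc] at hcond
      have hii : ∀ line ∈ body, PySem.Chars.startswith line ("ii".toList) = true →
          2 ≤ (PySem.Chars.split₀ line).length := by
        intro line hlmem hstw
        have hstw' : PySem.Chars.startswith line ['i','i'] = true := by simpa using hstw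
        have := List.all_eq_true.mp hcond line hlmem
        simpa [hstw'] using this
      obtain ⟨st', pk, hrun, hfold, hdict⟩ := pv_stdoutA body { dict := st.dict.insert (String.ofList (PySem.Chars.upper p0)) [], mode := PvMode.stdout, json_str := st.json_str, brace := st.brace, name := String.ofList (PySem.Chars.upper p0), status := PySem.Chars.upper p1 } st.dict [] rfl hsucc rfl hbody hii
      refine ⟨st', ?_, ?_⟩
      · simp only [pvRunA, List.foldl_cons, Option.bind_some] at hrun ⊢
        rw [hstep]
        exact hrun
      · rw [pvSegStep]
        simp only [Option.bind_some, hsplit, hget0, hget1, hjson, Bool.false_eq_true, if_neg,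
                   not_false_iff, if_pos hsucc]
        have hpkgs : pvSegPkgs body = some pk := hfold
        rw [hpkgs, Option.map_some, hdict, PySem.Dict.insert_insert_self]
    · rw [if_neg hsucc] at hcond
      have hrun := pv_stdoutSkipA body { dict := st.dict.insert (String.ofList (PySem.Chars.upper p0)) [], mode := PvMode.stdout, json_str := st.json_str, brace := st.brace, name := String.ofList (PySem.Chars.upper p0), status := PySem.Chars.upper p1 } rfl hsucc hbody
      refine ⟨{ dict := st.dict.insert (String.ofList (PySem.Chars.upper p0)) [], mode := PvMode.stdout, json_str := st.json_str, brace := st.brace, name := String.ofList (PySem.Chars.upper p0), status := PySem.Chars.upper p1 }, ?_, ?_⟩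
      · simp only [pvRunA, List.foldl_cons, Option.bind_some] at hrun ⊢
        rw [hstep]
        exact hrun
      · rw [pvSegStep]
        simp only [Option.bind_some, hsplit, hget0, hget1, hjson, Bool.false_eq_true, if_neg,
                   not_false_iff, if_neg hsucc]

theorem pv_chainA (segs : List (List (List Char))) : ∀ (st : PvStA),
    (∀ seg ∈ segs, pvSegOK seg = true) →
    (∀ seg ∈ segs, ∃ h b, seg = h :: b ∧ pvHdrA h = true ∧ ∀ x ∈ b, pvHdrA x = false) →
    ∃ st', pvRunA (some st) segs.flatten = some st' ∧
      segs.foldl pvSegStep (some st.dict) = some st'.dict := by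
  induction segs with
  | nil => intro st _ _; exact ⟨st, rfl, rfl⟩
  | cons seg rest ih =>
    intro st hok hshape
    obtain ⟨h, b, rfl, hhdr, hb⟩ := hshape seg (List.mem_cons_self)
    obtain ⟨st1, hrun1, hseg1⟩ := pv_recordA st h b (Or.inr hhdr) hb (hok _ (List.mem_cons_self))
    obtain ⟨st', hrun, hfold⟩ := ih st1 (fun s hs => hok s (List.mem_cons_of_mem _ hs))
      (fun s hs => hshape s (List.mem_cons_of_mem _ hs))
    refine ⟨st', ?_, ?_⟩
    · simp only [List.flatten_cons, pvRunA, List.foldl_append] at hrun ⊢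
      simp only [pvRunA] at hrun1
      rw [hrun1]
      exact hrun
    · simp only [List.foldl_cons]
      rw [hseg1]
      exact hfold

-- ===== VERDICT (by name: the statement is the Claim_ definition above) =====

theorem parse_dpkg_run_spec : Claim_equal_parse_dpkg_run := by
  intro s _ hpre
  show parse_dpkg_run s = parse_dpkg_run_alt s
  simp only [parse_dpkg_run, parse_dpkg_run_alt]
  cases hls : PySem.Chars.splitOn s.toList ['\n'] with
  | nil => rfl
  | cons l0 rest =>
    have hpre' : ∀ seg ∈ pvRecords (l0 :: rest), pvSegOK seg = true := by
      rw [← hls]; exact hpre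
    have hshape0 : ∀ x ∈ rest.takeWhile (fun x => !pvHdrB x), pvHdrA x = false := by
      intro x hx
      have hx' := List.mem_takeWhile_imp hx
      rw [← pv_hdr_eq]
      simpa using hx'
    have hok0 : pvSegOK (l0 :: rest.takeWhile (fun x => !pvHdrB x)) = true := by
      apply hpre'
      rw [pv_records_cons]
      exact List.mem_cons_self
    obtain ⟨st1, hrun1, hseg1⟩ := pv_recordA { dict := PySem.Dict.empty, mode := PvMode.new, json_str := [], brace := 0, name := "", status := [] } l0 (rest.takeWhile (fun x => !pvHdrB x)) (Or.inl rfl) hshape0 hok0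
    obtain ⟨stf, hrunf, hfoldf⟩ := pv_chainA (pvRecords (rest.dropWhile (fun x => !pvHdrB x))) st1
      (by
        intro seg hseg
        apply hpre'
        rw [pv_records_cons]
        exact List.mem_cons_of_mem _ hseg)
      (by
        intro seg hseg
        obtain ⟨h, b, rfl, hh⟩ := pv_records_tail_hdr (l0 :: rest) seg
          (by rw [pv_records_cons, List.tail_cons]; exact hseg)
        obtain ⟨h', b', heq, hb'⟩ := pv_records_shape (l0 :: rest) (h :: b)
          (by rw [pv_records_cons]; exact List.mem_cons_of_mem _ hseg)
        have e := List.cons.inj heq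
        refine ⟨h, b, rfl, by rw [← pv_hdr_eq]; exact hh, ?_⟩
        intro x hx
        rw [← pv_hdr_eq]
        exact hb' x (e.2 ▸ hx))
    have hseg1' : pvSegStep (some PySem.Dict.empty) (l0 :: rest.takeWhile (fun x => !pvHdrB x)) =
        some st1.dict := hseg1
    have hA : pvRunA (some { dict := PySem.Dict.empty, mode := PvMode.new, json_str := [], brace := 0, name := "", status := [] }) (l0 :: rest) = some stf := by
      conv_lhs => rw [show (l0 :: rest) = (pvRecords (l0 :: rest)).flatten from
        (pv_records_flatten _).symm, pv_records_cons, List.flatten_cons]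
      show pvRunA (some _) (_ ++ _) = _
      simp only [pvRunA, List.foldl_append]
      simp only [pvRunA] at hrun1 hrunf
      rw [hrun1]
      exact hrunf
    rw [hA]
    show stf.dict.items =
      (match List.foldl pvSegStep (some PySem.Dict.empty)
          ((List.foldl (fun (p : List (List (List Char)) × List (List Char)) line =>
              if pvHdrB line then (p.1 ++ [p.2], [line]) else (p.1, p.2 ++ [line])) ([], [l0]) rest).1 ++
            [(List.foldl (fun (p : List (List (List Char)) × List (List Char)) line =>
              if pvHdrB line then (p.1 ++ [p.2], [line]) else (p.1, p.2 ++ [line])) ([], [l0]) rest).2]) with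
        | some d => d.items
        | none => [])
    rw [pv_segB rest [] [l0]]
    simp only [List.nil_append, List.singleton_append]
    rw [List.foldl_cons, hseg1', hfoldf]
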